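-- pv_equiv track=rewrite | github.com/niranjan-nagaraju/Development | python/interviewbit/arrays/hotel_bookings_possible/hotel_bookings_possible_2.py | hotel_bookings_possible
-- ===== SOURCE A (Python) =====
-- def hotel_bookings_possible(A, D, k):
-- 	A.sort()
-- 	D.sort()
--
-- 	rooms_needed = 0
-- 	i, j = 0,0
-- 	while i < len(A) and j < len(D):
-- 		if A[i] < D[j]:
-- 			i += 1
-- 			rooms_needed += 1
-- 		else:
-- 			j += 1
-- 			rooms_needed -= 1
--
-- 		if rooms_needed > k:
-- 			return False
--
--
-- 	# Run a check if arrivals[] is not fully exhausted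
-- 	while i < len(A):
-- 		rooms_needed += 1
-- 		i += 1
-- 		if rooms_needed > k:
-- 			return False
--
-- 	# NOTE: If only the departures remain un-processed
-- 	# rooms required will only go down
-- 	# and can be skipped
--
-- 	return True
-- ===== SOURCE B (Python) =====
-- def hotel_bookings_possible(A, D, k):
-- 	# Event-sweep reformulation. Like the original, this sorts A and D in place.
-- 	A.sort()
-- 	D.sort()
-- 	if not A:
-- 		# no bookings at all: trivially possible
-- 		return True
-- 	# departures listed first so that, at equal times, a stable sort by time
-- 	# frees a room before the simultaneous arrival claims one
-- 	events = sorted([(t, -1) for t in D] + [(t, 1) for t in A], key=lambda e: e[0])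
-- 	count = 0
-- 	for _, delta in events:
-- 		count += delta
-- 		if count > k:
-- 			return False
-- 	return True
-- ===== Notes on version B (the rewrite author's own statement) =====
-- stated objective: idiomatic
-- what changed: Replaces the two hand-rolled index-based merge loops with a single sorted event list (time, +1/-1) swept once with a running room count; both implementations still sort A and D in place.
import Mathlib
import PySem

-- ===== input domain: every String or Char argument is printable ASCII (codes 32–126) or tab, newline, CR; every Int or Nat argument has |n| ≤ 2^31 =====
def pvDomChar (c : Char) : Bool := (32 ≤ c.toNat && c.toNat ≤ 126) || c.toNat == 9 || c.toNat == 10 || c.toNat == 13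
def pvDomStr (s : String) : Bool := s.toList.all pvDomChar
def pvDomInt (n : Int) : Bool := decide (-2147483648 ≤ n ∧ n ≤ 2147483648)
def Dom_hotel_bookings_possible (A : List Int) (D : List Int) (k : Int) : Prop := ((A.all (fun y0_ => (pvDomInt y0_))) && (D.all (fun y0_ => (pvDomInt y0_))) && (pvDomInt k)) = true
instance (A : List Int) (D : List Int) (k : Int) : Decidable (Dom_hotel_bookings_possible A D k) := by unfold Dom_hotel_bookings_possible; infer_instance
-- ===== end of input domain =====

-- B replaces A's two index-based merge loops with one sorted (time, ±1) event list swept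
-- once with a running count (idiomatic, same cost). NOTE: the Python versions both sort
-- A and D in place; the equivalence proved here is about the return value.

-- ===== PORT A =====
-- second while loop of A: only arrivals remain
def hbpGoA2 : List Int → Int → Int → Bool
  | [], _, _ => true
  | _ :: as, rooms, k =>
      if rooms + 1 > k then false else hbpGoA2 as (rooms + 1) k

-- first while loop of A: i/j cursors rendered as the remaining suffixes of the sorted lists
def hbpGoA : List Int → List Int → Int → Int → Bool
  | a :: as, d :: ds, rooms, k =>
      if a < d then
        (if rooms + 1 > k then false else hbpGoA as (d :: ds) (rooms + 1) k)
      else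
        (if rooms - 1 > k then false else hbpGoA (a :: as) ds (rooms - 1) k)
  | as, [], rooms, k => hbpGoA2 as rooms k
  | [], _ :: _, _, _ => true
  termination_by as ds _ _ => as.length + ds.length

def hotel_bookings_possible (A : List Int) (D : List Int) (k : Int) : Bool :=
  hbpGoA (PySem.List.sorted A (fun x => x)) (PySem.List.sorted D (fun x => x)) 0 k

-- ===== PORT B =====
-- B's for-loop over the events with the running count and early False
def hbpScan : List (Int × Int) → Int → Int → Bool
  | [], _, _ => true
  | (_, delta) :: es, count, k =>
      if count + delta > k then false else hbpScan es (count + delta) k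

def hotel_bookings_possible_alt (A : List Int) (D : List Int) (k : Int) : Bool :=
  let sa := PySem.List.sorted A (fun x => x)
  let sd := PySem.List.sorted D (fun x => x)
  if sa = [] then true
  else
    let events := PySem.List.sorted
      (sd.map (fun t => (t, (-1 : Int))) ++ sa.map (fun t => (t, (1 : Int))))
      (fun e => e.1)
    hbpScan events 0 k

-- ===== PRECONDITION & SPEC =====
def Spec_hotel_bookings_possible (A : List Int) (D : List Int) (k : Int) (out : Bool) : Prop := out = hotel_bookings_possible_alt A D k
instance (A : List Int) (D : List Int) (k : Int) (out : Bool) : Decidable (Spec_hotel_bookings_possible A D k out) := by unfold Spec_hotel_bookings_possible; infer_instance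

-- ===== CLAIM (what is proved, stated in full; the proofs are below) =====
def Claim_equal_hotel_bookings_possible : Prop := ∀ (A : List Int) (D : List Int) (k : Int), Dom_hotel_bookings_possible A D k → Spec_hotel_bookings_possible A D k (hotel_bookings_possible A D k)

-- ===== LEMMAS AND PROOFS =====

-- the merged event sequence A's loop walks through (departures first on ties)
def hbpMerge : List Int → List Int → List (Int × Int)
  | ds, [] => ds.map (fun t => (t, (-1 : Int)))
  | [], as => as.map (fun t => (t, (1 : Int)))
  | d :: ds, a :: as =>
      if a < d then (a, (1 : Int)) :: hbpMerge (d :: ds) as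
      else (d, (-1 : Int)) :: hbpMerge ds (a :: as)
  termination_by ds as => ds.length + as.length

lemma hbpMerge_nil_right (ds : List Int) :
    hbpMerge ds [] = ds.map (fun t => (t, (-1 : Int))) := by
  cases ds <;> simp [hbpMerge]

lemma hbpMerge_nil_left (as : List Int) :
    hbpMerge [] as = as.map (fun t => (t, (1 : Int))) := by
  cases as <;> simp [hbpMerge]

-- inserting an arrival ≥ everything already merged extends the merge on the right
lemma insertBy_merge (sd p : List Int) (a : Int) (hp : ∀ x ∈ p, x ≤ a) :
    PySem.List.insertBy (fun e f : Int × Int => decide (e.1 < f.1)) (a, (1 : Int))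
      (hbpMerge sd p) = hbpMerge sd (p ++ [a]) := by
  cases sd with
  | nil =>
      rw [hbpMerge_nil_left, hbpMerge_nil_left]
      rw [PySem.List.insertBy_of_forall_not_before]
      · simp
      · intro y hy
        simp only [List.mem_map] at hy
        obtain ⟨t, ht, rfl⟩ := hy
        simpa using hp t ht
  | cons d ds =>
      cases p with
      | nil =>
          rw [hbpMerge_nil_right]
          by_cases h : a < d
          · simp [PySem.List.insertBy, h, hbpMerge, hbpMerge_nil_right]
          · have h2 := insertBy_merge ds [] a (by simp)
            rw [hbpMerge_nil_right] at h2
            simp [PySem.List.insertBy, h, hbpMerge, h2, hbpMerge_nil_right]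
      | cons p0 ps =>
          have hp0 : p0 ≤ a := hp p0 (by simp)
          by_cases h : p0 < d
          · have hm : hbpMerge (d :: ds) (p0 :: ps) = (p0, (1:Int)) :: hbpMerge (d :: ds) ps := by
              simp [hbpMerge, h]
            have hstep : PySem.List.insertBy (fun e f : Int × Int => decide (e.1 < f.1)) (a, (1:Int))
                ((p0, (1:Int)) :: hbpMerge (d :: ds) ps)
                = (p0, (1:Int)) :: PySem.List.insertBy (fun e f : Int × Int => decide (e.1 < f.1)) (a, (1:Int)) (hbpMerge (d :: ds) ps) := by
              simp [PySem.List.insertBy, not_lt.mpr hp0]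
            rw [hm, hstep, insertBy_merge (d :: ds) ps a (fun x hx => hp x (by simp [hx]))]
            simp [hbpMerge, h]
          · have hd : d ≤ a := le_trans (not_lt.mp h) hp0
            have hm : hbpMerge (d :: ds) (p0 :: ps) = (d, (-1:Int)) :: hbpMerge ds (p0 :: ps) := by
              simp [hbpMerge, h]
            have hstep : PySem.List.insertBy (fun e f : Int × Int => decide (e.1 < f.1)) (a, (1:Int))
                ((d, (-1:Int)) :: hbpMerge ds (p0 :: ps))
                = (d, (-1:Int)) :: PySem.List.insertBy (fun e f : Int × Int => decide (e.1 < f.1)) (a, (1:Int)) (hbpMerge ds (p0 :: ps)) := by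
              simp [PySem.List.insertBy, not_lt.mpr hd]
            rw [hm, hstep, insertBy_merge ds (p0 :: ps) a hp]
            simp [hbpMerge, h]
  termination_by sd.length + p.length

lemma foldl_insert_merge (sa : List Int) :
    ∀ (sd p : List Int), sa.Pairwise (· ≤ ·) → (∀ x ∈ p, ∀ y ∈ sa, x ≤ y) →
    List.foldl (fun acc x => PySem.List.insertBy (fun e f : Int × Int => decide (e.1 < f.1)) x acc)
      (hbpMerge sd p) (sa.map (fun t => (t, (1 : Int)))) = hbpMerge sd (p ++ sa) := by
  induction sa with
  | nil => intro sd p _ _; simp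
  | cons a rest ih =>
      intro sd p hpair hb
      have h1 : ∀ x ∈ p, x ≤ a := fun x hx => hb x hx a (by simp)
      simp only [List.map_cons, List.foldl_cons]
      rw [insertBy_merge sd p a h1]
      have hb' : ∀ x ∈ p ++ [a], ∀ y ∈ rest, x ≤ y := by
        intro x hx y hy
        rcases List.mem_append.mp hx with h | h
        · exact hb x h y (by simp [hy])
        · simp only [List.mem_singleton] at h
          subst h
          exact (List.pairwise_cons.mp hpair).1 y hy
      rw [ih sd (p ++ [a]) (List.pairwise_cons.mp hpair).2 hb']
      simp

-- the stable sort of B's event list is exactly A's merge order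
lemma sorted_events_eq_merge (sd sa : List Int)
    (hsd : sd.Pairwise (· ≤ ·)) (hsa : sa.Pairwise (· ≤ ·)) :
    PySem.List.sorted (sd.map (fun t => (t, (-1 : Int))) ++ sa.map (fun t => (t, (1 : Int))))
      (fun e => e.1) = hbpMerge sd sa := by
  rw [PySem.List.sorted_eq_foldl_insertBy, List.foldl_append]
  have h1 : List.foldl (fun acc x => PySem.List.insertBy (fun e f : Int × Int => decide (e.1 < f.1)) x acc)
      [] (sd.map (fun t => (t, (-1 : Int)))) = hbpMerge sd [] := by
    rw [← PySem.List.sorted_eq_foldl_insertBy]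
    rw [hbpMerge_nil_right]
    apply PySem.List.sorted_eq_self_of_pairwise
    exact List.pairwise_map.mpr (by simpa using hsd)
  rw [h1]
  have := foldl_insert_merge sa sd [] hsa (by simp)
  simpa using this

-- a departure-only tail never trips the check once the count is within budget
lemma scan_departures (ds : List Int) : ∀ (r k : Int), r ≤ k →
    hbpScan (ds.map (fun t => (t, (-1 : Int)))) r k = true := by
  induction ds with
  | nil => intro r k _; simp [hbpScan]
  | cons d ds ih =>
      intro r k hr
      have : ¬ (r + (-1) > k) := by omega
      simp only [List.map_cons, hbpScan, this, if_neg this]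
      exact ih (r + (-1)) k (by omega)

lemma goA2_eq_scan (as : List Int) : ∀ (r k : Int),
    hbpGoA2 as r k = hbpScan (as.map (fun t => (t, (1 : Int)))) r k := by
  induction as with
  | nil => intro r k; simp [hbpGoA2, hbpScan]
  | cons a as ih =>
      intro r k
      simp only [hbpGoA2, List.map_cons, hbpScan]
      split_ifs with h
      · rfl
      · exact ih (r + 1) k

lemma goA_eq_scan (sa sd : List Int) (r k : Int) (h : sa ≠ [] ∨ r ≤ k) :
    hbpGoA sa sd r k = hbpScan (hbpMerge sd sa) r k := by
  cases sa with
  | nil =>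
      have hr : r ≤ k := by tauto
      rw [hbpMerge_nil_right, scan_departures sd r k hr]
      cases sd <;> simp [hbpGoA, hbpGoA2]
  | cons a as =>
      cases sd with
      | nil =>
          rw [hbpMerge_nil_left]
          have : hbpGoA (a :: as) [] r k = hbpGoA2 (a :: as) r k := by
            simp [hbpGoA]
          rw [this]
          exact goA2_eq_scan (a :: as) r k
      | cons d ds =>
          by_cases hlt : a < d
          · have hm : hbpMerge (d :: ds) (a :: as) = (a, (1:Int)) :: hbpMerge (d :: ds) as := by
              simp [hbpMerge, hlt]
            rw [hm]
            simp only [hbpGoA, hlt, if_pos, hbpScan]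
            split_ifs with hc
            · rfl
            · exact goA_eq_scan as (d :: ds) (r + 1) k (Or.inr (by omega))
          · have hm : hbpMerge (d :: ds) (a :: as) = (d, (-1:Int)) :: hbpMerge ds (a :: as) := by
              simp [hbpMerge, hlt]
            rw [hm]
            simp only [hbpGoA, hlt, ite_false, hbpScan, sub_eq_add_neg]
            split_ifs with hc
            · rfl
            · exact goA_eq_scan (a :: as) ds (r + (-1)) k (Or.inl (by simp))
  termination_by sa.length + sd.length

-- ===== VERDICT (by name: the statement is the Claim_ definition above) =====
theorem hotel_bookings_possible_spec : Claim_equal_hotel_bookings_possible := by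
  intro A D k _
  unfold Spec_hotel_bookings_possible hotel_bookings_possible hotel_bookings_possible_alt
  simp only []
  by_cases h : PySem.List.sorted A (fun x => x) = []
  · rw [h]
    simp only [if_pos rfl]
    cases PySem.List.sorted D (fun x => x) <;> simp [hbpGoA, hbpGoA2]
  · simp only [if_neg h]
    rw [sorted_events_eq_merge (PySem.List.sorted D (fun x => x)) (PySem.List.sorted A (fun x => x))
      (by simpa using PySem.List.sorted_pairwise D (fun x => x))
      (by simpa using PySem.List.sorted_pairwise A (fun x => x))]
    exact goA_eq_scan _ _ 0 k (Or.inl h)
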